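-- pv_equiv track=rewrite | github.com/FragileTech/fragile | docs/fix_transitions.py | fix_transitions
-- ===== SOURCE A (Python) =====
-- def fix_transitions(content: str) -> tuple[str, int]:
--     """Remove all --- except YAML frontmatter. Returns (fixed_content, count_removed)."""
--     lines = content.split('\n')
--     result = []
--     removed = 0
--     hr_count = 0  # Track which --- we're at
--     in_frontmatter = False
--
--     for i, line in enumerate(lines):
--         stripped = line.strip()
--
--         if stripped == '---':
--             hr_count += 1
--             # First --- starts frontmatter (if at line 0 or 1)
--             if hr_count == 1 and i <= 1:
--                 in_frontmatter = True
--                 result.append(line)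
--                 continue
--             # Second --- closes frontmatter
--             if hr_count == 2 and in_frontmatter:
--                 in_frontmatter = False
--                 result.append(line)
--                 continue
--             # All other --- are removed
--             removed += 1
--             result.append('')  # Keep empty line for spacing
--             continue
--
--         result.append(line)
--
--     return '\n'.join(result), removed
-- ===== SOURCE B (Python) =====
-- def fix_transitions(content: str) -> tuple[str, int]:
--     """Remove all --- except YAML frontmatter. Returns (fixed_content, count_removed)."""
--     lines = content.split('\n')
--     hrs = [i for i, line in enumerate(lines) if line.strip() == '---']
--     keep = hrs[:2] if hrs and hrs[0] <= 1 else []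
--     result = []
--     removed = 0
--     for i, line in enumerate(lines):
--         if line.strip() == '---' and i not in keep:
--             result.append('')
--             removed += 1
--         else:
--             result.append(line)
--     return '\n'.join(result), removed
-- ===== Notes on version B (the rewrite author's own statement) =====
-- stated objective: simpler
-- what changed: Replaces A's stateful single pass (hr_count/in_frontmatter flags threaded through branches) by two stateless passes: first collect the indices of horizontal-rule lines and compute the set of at most two frontmatter indices to keep, then map over the lines blanking every other horizontal-rule line.
import Mathlib
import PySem

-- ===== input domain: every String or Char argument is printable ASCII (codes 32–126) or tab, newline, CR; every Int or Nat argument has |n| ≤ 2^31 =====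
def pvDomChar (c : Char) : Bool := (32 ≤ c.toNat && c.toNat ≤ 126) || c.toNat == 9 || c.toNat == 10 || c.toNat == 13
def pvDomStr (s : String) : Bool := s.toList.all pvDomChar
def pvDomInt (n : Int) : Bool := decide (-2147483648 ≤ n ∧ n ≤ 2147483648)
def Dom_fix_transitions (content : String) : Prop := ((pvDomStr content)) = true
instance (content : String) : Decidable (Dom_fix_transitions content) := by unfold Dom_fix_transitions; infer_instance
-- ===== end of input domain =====

-- B replaces A's stateful single pass (hr_count/in_frontmatter flags) by two stateless passes:
-- collect '---' line indices, compute the (≤ 2) kept frontmatter indices, then map. Objective: simpler.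

-- ===== PORT A =====
-- the for-loop of A, state (result, removed, hr_count, in_frontmatter), i the running enumerate index
def fixAGo : List (List Char) → Nat → List (List Char) → Int → Int → Bool → List (List Char) × Int
  | [], _, res, rem, _, _ => (res, rem)
  | line :: rest, i, res, rem, hr, fm =>
    if PySem.Chars.strip line = ['-','-','-'] then
      if hr + 1 = 1 ∧ i ≤ 1 then fixAGo rest (i+1) (res ++ [line]) rem (hr+1) true
      else if hr + 1 = 2 ∧ fm = true then fixAGo rest (i+1) (res ++ [line]) rem (hr+1) false
      else fixAGo rest (i+1) (res ++ [[]]) (rem+1) (hr+1) fm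
    else fixAGo rest (i+1) (res ++ [line]) rem hr fm

def fix_transitions (content : String) : String × Int :=
  let lines := PySem.Chars.splitOn content.toList ['\n']
  let r := fixAGo lines 0 [] 0 0 false
  (String.ofList (PySem.Chars.join ['\n'] r.1), r.2)

-- ===== PORT B =====
-- the comprehension [i for i, line in enumerate(lines) if line.strip() == '---']
def hrIdxs : List (List Char) → Nat → List Nat
  | [], _ => []
  | l :: ls, i => if PySem.Chars.strip l = ['-','-','-'] then i :: hrIdxs ls (i+1) else hrIdxs ls (i+1)

-- B's output loop, state (result, removed)
def fixBGo (keep : List Nat) : List (List Char) → Nat → List (List Char) → Int → List (List Char) × Int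
  | [], _, out, rem => (out, rem)
  | l :: ls, i, out, rem =>
    if PySem.Chars.strip l = ['-','-','-'] ∧ i ∉ keep then fixBGo keep ls (i+1) (out ++ [[]]) (rem+1)
    else fixBGo keep ls (i+1) (out ++ [l]) rem

def fix_transitions_alt (content : String) : String × Int :=
  let lines := PySem.Chars.splitOn content.toList ['\n']
  let hrs := hrIdxs lines 0
  let keep := match hrs with
    | [] => []
    | i0 :: _ => if i0 ≤ 1 then hrs.take 2 else []
  let r := fixBGo keep lines 0 [] 0
  (String.ofList (PySem.Chars.join ['\n'] r.1), r.2)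

-- ===== PRECONDITION & SPEC =====
def Spec_fix_transitions (content : String) (out : String × Int) : Prop := out = fix_transitions_alt content
instance (content : String) (out : String × Int) : Decidable (Spec_fix_transitions content out) := by unfold Spec_fix_transitions; infer_instance

-- ===== CLAIM (what is proved, stated in full; the proofs are below) =====
def Claim_equal_fix_transitions : Prop := ∀ (content : String), Dom_fix_transitions content → Spec_fix_transitions content (fix_transitions content)

-- ===== LEMMAS AND PROOFS =====

-- A's decision on each future '---' line (at index j, with hr/fm the current state) agrees with j ∈ keep
def agree (keep : List Nat) : Int → Bool → List Nat → Prop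
  | _, _, [] => True
  | hr, fm, j :: js =>
    (((hr + 1 = 1 ∧ j ≤ 1) ∨ (hr + 1 = 2 ∧ fm = true)) ↔ j ∈ keep) ∧
    agree keep (hr + 1)
      (if hr + 1 = 1 ∧ j ≤ 1 then true else if hr + 1 = 2 ∧ fm = true then false else fm) js

lemma go_eq (keep : List Nat) :
    ∀ (ls : List (List Char)) (i : Nat) (res : List (List Char)) (rem hr : Int) (fm : Bool),
    agree keep hr fm (hrIdxs ls i) → fixAGo ls i res rem hr fm = fixBGo keep ls i res rem := by
  intro ls
  induction ls with
  | nil => intros; rfl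
  | cons l rest ih =>
    intro i res rem hr fm hag
    by_cases hs : PySem.Chars.strip l = ['-','-','-']
    · rw [hrIdxs] at hag
      rw [if_pos hs] at hag
      rw [agree] at hag
      obtain ⟨hiff, hrec⟩ := hag
      by_cases h1 : hr + 1 = 1 ∧ i ≤ 1
      · have hk : i ∈ keep := hiff.mp (Or.inl h1)
        rw [fixAGo, fixBGo, if_pos hs, if_pos h1,
            if_neg (by simp [hk] : ¬(PySem.Chars.strip l = ['-','-','-'] ∧ i ∉ keep))]
        rw [if_pos h1] at hrec
        exact ih (i+1) (res ++ [l]) rem (hr+1) true hrec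
      · by_cases h2 : hr + 1 = 2 ∧ fm = true
        · have hk : i ∈ keep := hiff.mp (Or.inr h2)
          rw [fixAGo, fixBGo, if_pos hs, if_neg h1, if_pos h2,
              if_neg (by simp [hk] : ¬(PySem.Chars.strip l = ['-','-','-'] ∧ i ∉ keep))]
          rw [if_neg h1, if_pos h2] at hrec
          exact ih (i+1) (res ++ [l]) rem (hr+1) false hrec
        · have hk : i ∉ keep := fun h => (by
            rcases hiff.mpr h with h' | h'
            · exact h1 h'
            · exact h2 h')
          rw [fixAGo, fixBGo, if_pos hs, if_neg h1, if_neg h2, if_pos ⟨hs, hk⟩]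
          rw [if_neg h1, if_neg h2] at hrec
          exact ih (i+1) (res ++ [[]]) (rem+1) (hr+1) fm hrec
    · rw [hrIdxs, if_neg hs] at hag
      rw [fixAGo, if_neg hs, fixBGo, if_neg (by simp [hs])]
      exact ih (i+1) (res ++ [l]) rem hr fm hag

lemma hrIdxs_lb : ∀ (ls : List (List Char)) (i : Nat), ∀ j ∈ hrIdxs ls i, i ≤ j := by
  intro ls
  induction ls with
  | nil => intro i j h; simp [hrIdxs] at h
  | cons l rest ih =>
    intro i j h
    rw [hrIdxs] at h
    by_cases hs : PySem.Chars.strip l = ['-','-','-']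
    · rw [if_pos hs] at h
      rcases List.mem_cons.mp h with h | h
      · omega
      · have := ih (i+1) j h; omega
    · rw [if_neg hs] at h
      have := ih (i+1) j h; omega

lemma hrIdxs_pairwise : ∀ (ls : List (List Char)) (i : Nat), (hrIdxs ls i).Pairwise (· < ·) := by
  intro ls
  induction ls with
  | nil => intro i; simp [hrIdxs]
  | cons l rest ih =>
    intro i
    rw [hrIdxs]
    by_cases hs : PySem.Chars.strip l = ['-','-','-']
    · rw [if_pos hs]
      exact List.Pairwise.cons (fun j hj => by have := hrIdxs_lb rest (i+1) j hj; omega) (ih (i+1))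
    · rw [if_neg hs]; exact ih (i+1)

lemma agree_tail (keep : List Nat) :
    ∀ (js : List Nat) (hr : Int) (fm : Bool), 2 ≤ hr → (∀ j ∈ js, j ∉ keep) → agree keep hr fm js := by
  intro js
  induction js with
  | nil => intro hr fm _ _; trivial
  | cons j js ih =>
    intro hr fm hhr hnk
    rw [agree]
    refine ⟨⟨fun h => ?_, fun h => absurd h (hnk j (List.mem_cons_self ..))⟩, ?_⟩
    · rcases h with h | h <;> omega
    · rw [if_neg (by omega : ¬(hr + 1 = 1 ∧ j ≤ 1)),
          if_neg (fun h => by omega : ¬(hr + 1 = 2 ∧ fm = true))]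
      exact ih (hr+1) fm (by omega) (fun x hx => hnk x (List.mem_cons_of_mem _ hx))

lemma agree_main (js : List Nat) (keep : List Nat)
    (hk : keep = match js with | [] => [] | i0 :: _ => if i0 ≤ 1 then js.take 2 else [])
    (hp : js.Pairwise (· < ·)) :
    agree keep 0 false js := by
  cases js with
  | nil => trivial
  | cons j0 js1 =>
    by_cases h0 : j0 ≤ 1
    · simp only [if_pos h0] at hk
      subst hk
      rw [agree]
      constructor
      · constructor
        · intro _; exact List.mem_cons_self ..
        · intro _; exact Or.inl ⟨rfl, h0⟩
      · rw [if_pos ⟨rfl, h0⟩]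
        match js1, hp with
        | [], _ => trivial
        | j1 :: js2, hp =>
          rw [agree]
          constructor
          · constructor
            · intro _
              simp [List.take]
            · intro _; exact Or.inr ⟨rfl, rfl⟩
          · rw [if_neg (by omega : ¬((0:Int) + 1 + 1 = 1 ∧ j1 ≤ 1)), if_pos ⟨rfl, rfl⟩]
            apply agree_tail _ _ _ _ (by omega)
            intro x hx
            have h01 : j0 < j1 := (List.pairwise_cons.mp hp).1 j1 (List.mem_cons_self ..)
            have h0x : j0 < x := (List.pairwise_cons.mp hp).1 x (List.mem_cons_of_mem _ hx)
            have h1x : j1 < x :=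
              (List.pairwise_cons.mp (List.pairwise_cons.mp hp).2).1 x hx
            simp [List.take]
            omega
    · simp only [if_neg h0] at hk
      subst hk
      rw [agree]
      refine ⟨⟨fun h => ?_, fun h => absurd h (List.not_mem_nil)⟩, ?_⟩
      · rcases h with h | h
        · exact absurd h.2 h0
        · simp at h
      · rw [if_neg (fun h => h0 h.2), if_neg (by simp : ¬((0:Int) + 1 = 2 ∧ false = true))]
        match js1 with
        | [] => trivial
        | j1 :: js2 =>
          rw [agree]
          refine ⟨⟨fun h => ?_, fun h => absurd h (List.not_mem_nil)⟩, ?_⟩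
          · rcases h with h | h
            · exact absurd h.1 (by omega)
            · simp at h
          · rw [if_neg (by omega : ¬((0:Int) + 1 + 1 = 1 ∧ j1 ≤ 1)),
                if_neg (by simp : ¬((0:Int) + 1 + 1 = 2 ∧ false = true))]
            exact agree_tail _ _ _ _ (by omega) (by simp)

-- ===== VERDICT (by name: the statement is the Claim_ definition above) =====
theorem fix_transitions_spec : Claim_equal_fix_transitions := by
  intro content _
  show fix_transitions content = fix_transitions_alt content
  simp only [fix_transitions, fix_transitions_alt]
  have h := go_eq
    (match hrIdxs (PySem.Chars.splitOn content.toList ['\n']) 0 with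
      | [] => []
      | i0 :: _ => if i0 ≤ 1 then (hrIdxs (PySem.Chars.splitOn content.toList ['\n']) 0).take 2 else [])
    (PySem.Chars.splitOn content.toList ['\n']) 0 [] 0 0 false
    (agree_main _ _ rfl (hrIdxs_pairwise _ _))
  rw [h]
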